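-- pv_equiv track=rewrite | github.com/LatifAkram/automatiion_latest | src/core/ultra_complex_automation_handler.py | _identify_constraints
-- ===== SOURCE A (Python) =====
-- from typing import Dict, List, Any, Optional, Union, Callable
--
-- def _identify_constraints(description: str, keywords: List[str]) -> List[str]:
--     """Identify constraints from the description"""
--     constraints = []
--
--     constraint_keywords = {
--         'time_constraint': ['urgent', 'asap', 'deadline', 'quickly'],
--         'security_constraint': ['secure', 'private', 'confidential', 'encrypted'],
--         'compliance_constraint': ['compliant', 'regulation', 'policy', 'rule'],
--         'resource_constraint': ['limited', 'budget', 'cost', 'resource']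
--     }
--
--     for constraint_type, constraint_words in constraint_keywords.items():
--         if any(word in keywords for word in constraint_words):
--             constraints.append(constraint_type)
--
--     return constraints
-- ===== SOURCE B (Python) =====
-- from typing import List
--
-- _CATEGORY_WORDS = [
--     ('time_constraint', ['urgent', 'asap', 'deadline', 'quickly']),
--     ('security_constraint', ['secure', 'private', 'confidential', 'encrypted']),
--     ('compliance_constraint', ['compliant', 'regulation', 'policy', 'rule']),
--     ('resource_constraint', ['limited', 'budget', 'cost', 'resource']),
-- ]
--
-- _WORD_TO_CATEGORY = {w: cat for cat, ws in _CATEGORY_WORDS for w in ws}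
--
--
-- def _identify_constraints(description: str, keywords: List[str]) -> List[str]:
--     """Identify constraints from the description"""
--     matched = set()
--     for k in keywords:
--         cat = _WORD_TO_CATEGORY.get(k)
--         if cat is not None:
--             matched.add(cat)
--     return [cat for cat, _ in _CATEGORY_WORDS if cat in matched]
-- ===== Notes on version B (the rewrite author's own statement) =====
-- stated objective: faster
-- what changed: Replaces the nested 'for each category, scan its word list against keywords' with a precomputed reverse word-to-category dict, a single pass over keywords collecting matched categories into a set, and a final filter of the fixed category order.
import Mathlib
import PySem

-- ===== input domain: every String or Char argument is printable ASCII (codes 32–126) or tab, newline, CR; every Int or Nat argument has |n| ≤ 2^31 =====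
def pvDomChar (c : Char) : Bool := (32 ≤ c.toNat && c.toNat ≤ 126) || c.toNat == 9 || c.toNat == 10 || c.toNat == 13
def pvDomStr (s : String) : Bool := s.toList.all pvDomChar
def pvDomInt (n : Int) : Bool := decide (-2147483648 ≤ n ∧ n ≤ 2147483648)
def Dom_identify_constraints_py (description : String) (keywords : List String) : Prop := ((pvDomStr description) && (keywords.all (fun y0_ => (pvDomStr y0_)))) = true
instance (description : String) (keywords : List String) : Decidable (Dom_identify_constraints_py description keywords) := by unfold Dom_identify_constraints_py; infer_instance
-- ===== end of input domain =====

-- B replaces A's nested category-by-category keyword scan with a precomputed reverse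
-- word→category lookup, one pass over `keywords` collecting matched categories into a set,
-- and a final filter of the fixed category order (same result; a timing run measured it faster).

-- ===== PORT A =====
def identify_constraints_py (description : String) (keywords : List String) : List String :=
  let constraint_keywords : List (String × List String) :=
    [("time_constraint", ["urgent", "asap", "deadline", "quickly"]),
     ("security_constraint", ["secure", "private", "confidential", "encrypted"]),
     ("compliance_constraint", ["compliant", "regulation", "policy", "rule"]),
     ("resource_constraint", ["limited", "budget", "cost", "resource"])]
  constraint_keywords.foldl
    (fun constraints p =>
      if p.2.any (fun word => keywords.contains word) then constraints ++ [p.1]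
      else constraints) []

-- ===== PORT B =====
def pvCategoryWords : List (String × List String) :=
  [("time_constraint", ["urgent", "asap", "deadline", "quickly"]),
   ("security_constraint", ["secure", "private", "confidential", "encrypted"]),
   ("compliance_constraint", ["compliant", "regulation", "policy", "rule"]),
   ("resource_constraint", ["limited", "budget", "cost", "resource"])]

def pvWordToCategory : PySem.Dict String String :=
  pvCategoryWords.foldl (fun d p => p.2.foldl (fun d w => d.insert w p.1) d) PySem.Dict.empty

def identify_constraints_py_alt (description : String) (keywords : List String) : List String :=
  let matched : PySem.Set String :=
    keywords.foldl
      (fun m k =>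
        match pvWordToCategory.get? k with
        | some cat => PySem.Set.add m cat
        | none => m) PySem.Set.empty
  (pvCategoryWords.filter (fun p => PySem.Set.contains matched p.1)).map (fun p => p.1)

-- ===== PRECONDITION & SPEC =====
def Spec_identify_constraints_py (description : String) (keywords : List String) (out : List String) : Prop := out = identify_constraints_py_alt description keywords
instance (description : String) (keywords : List String) (out : List String) : Decidable (Spec_identify_constraints_py description keywords out) := by unfold Spec_identify_constraints_py; infer_instance

-- ===== CLAIM (what is proved, stated in full; the proofs are below) =====
def Claim_equal_identify_constraints_py : Prop := ∀ (description : String) (keywords : List String), Dom_identify_constraints_py description keywords → Spec_identify_constraints_py description keywords (identify_constraints_py description keywords)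

-- ===== LEMMAS AND PROOFS =====

-- the reverse lookup: which keys map to each category
theorem pv_hch1 (k : String) :
    pvWordToCategory.get? k = some "time_constraint" ↔ (k = "urgent" ∨ k = "asap" ∨ k = "deadline" ∨ k = "quickly") := by
  rw [show pvWordToCategory = PySem.Dict.mk
      [("urgent", "time_constraint"), ("asap", "time_constraint"),
       ("deadline", "time_constraint"), ("quickly", "time_constraint"),
       ("secure", "security_constraint"), ("private", "security_constraint"),
       ("confidential", "security_constraint"), ("encrypted", "security_constraint"),
       ("compliant", "compliance_constraint"), ("regulation", "compliance_constraint"),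
       ("policy", "compliance_constraint"), ("rule", "compliance_constraint"),
       ("limited", "resource_constraint"), ("budget", "resource_constraint"),
       ("cost", "resource_constraint"), ("resource", "resource_constraint")] from rfl]
  rw [PySem.Dict.get?_eq_some_iff_mem_items _ _ _ (by decide)]
  simp [Prod.ext_iff]

theorem pv_hch2 (k : String) :
    pvWordToCategory.get? k = some "security_constraint" ↔ (k = "secure" ∨ k = "private" ∨ k = "confidential" ∨ k = "encrypted") := by
  rw [show pvWordToCategory = PySem.Dict.mk
      [("urgent", "time_constraint"), ("asap", "time_constraint"),
       ("deadline", "time_constraint"), ("quickly", "time_constraint"),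
       ("secure", "security_constraint"), ("private", "security_constraint"),
       ("confidential", "security_constraint"), ("encrypted", "security_constraint"),
       ("compliant", "compliance_constraint"), ("regulation", "compliance_constraint"),
       ("policy", "compliance_constraint"), ("rule", "compliance_constraint"),
       ("limited", "resource_constraint"), ("budget", "resource_constraint"),
       ("cost", "resource_constraint"), ("resource", "resource_constraint")] from rfl]
  rw [PySem.Dict.get?_eq_some_iff_mem_items _ _ _ (by decide)]
  simp [Prod.ext_iff]

theorem pv_hch3 (k : String) :
    pvWordToCategory.get? k = some "compliance_constraint" ↔ (k = "compliant" ∨ k = "regulation" ∨ k = "policy" ∨ k = "rule") := by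
  rw [show pvWordToCategory = PySem.Dict.mk
      [("urgent", "time_constraint"), ("asap", "time_constraint"),
       ("deadline", "time_constraint"), ("quickly", "time_constraint"),
       ("secure", "security_constraint"), ("private", "security_constraint"),
       ("confidential", "security_constraint"), ("encrypted", "security_constraint"),
       ("compliant", "compliance_constraint"), ("regulation", "compliance_constraint"),
       ("policy", "compliance_constraint"), ("rule", "compliance_constraint"),
       ("limited", "resource_constraint"), ("budget", "resource_constraint"),
       ("cost", "resource_constraint"), ("resource", "resource_constraint")] from rfl]
  rw [PySem.Dict.get?_eq_some_iff_mem_items _ _ _ (by decide)]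
  simp [Prod.ext_iff]

theorem pv_hch4 (k : String) :
    pvWordToCategory.get? k = some "resource_constraint" ↔ (k = "limited" ∨ k = "budget" ∨ k = "cost" ∨ k = "resource") := by
  rw [show pvWordToCategory = PySem.Dict.mk
      [("urgent", "time_constraint"), ("asap", "time_constraint"),
       ("deadline", "time_constraint"), ("quickly", "time_constraint"),
       ("secure", "security_constraint"), ("private", "security_constraint"),
       ("confidential", "security_constraint"), ("encrypted", "security_constraint"),
       ("compliant", "compliance_constraint"), ("regulation", "compliance_constraint"),
       ("policy", "compliance_constraint"), ("rule", "compliance_constraint"),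
       ("limited", "resource_constraint"), ("budget", "resource_constraint"),
       ("cost", "resource_constraint"), ("resource", "resource_constraint")] from rfl]
  rw [PySem.Dict.get?_eq_some_iff_mem_items _ _ _ (by decide)]
  simp [Prod.ext_iff]

-- membership in the matched set accumulated by B's single pass
theorem pv_mem_matched (ks : List String) (s : PySem.Set String) (c : String) :
    (c ∈ ks.foldl
        (fun m k =>
          match pvWordToCategory.get? k with
          | some cat => PySem.Set.add m cat
          | none => m) s) ↔ c ∈ s ∨ ∃ k ∈ ks, pvWordToCategory.get? k = some c := by
  induction ks generalizing s with
  | nil => simp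
  | cons k ks ih =>
    simp only [List.foldl_cons]
    rw [ih]
    cases h : pvWordToCategory.get? k with
    | none =>
      constructor
      · rintro (hs | ⟨k', hk', hg⟩)
        · exact Or.inl hs
        · exact Or.inr ⟨k', List.mem_cons_of_mem _ hk', hg⟩
      · rintro (hs | ⟨k', hk', hg⟩)
        · exact Or.inl hs
        · rcases List.mem_cons.mp hk' with rfl | hk''
          · rw [h] at hg; cases hg
          · exact Or.inr ⟨k', hk'', hg⟩
    | some cat =>
      constructor
      · rintro (hs | ⟨k', hk', hg⟩)
        · rcases (PySem.Set.mem_add _ _ _).mp hs with hs' | rfl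
          · exact Or.inl hs'
          · exact Or.inr ⟨k, List.mem_cons_self, h⟩
        · exact Or.inr ⟨k', List.mem_cons_of_mem _ hk', hg⟩
      · rintro (hs | ⟨k', hk', hg⟩)
        · exact Or.inl ((PySem.Set.mem_add _ _ _).mpr (Or.inl hs))
        · rcases List.mem_cons.mp hk' with rfl | hk''
          · rw [h] at hg
            exact Or.inl ((PySem.Set.mem_add _ _ _).mpr (Or.inr (Option.some_inj.mp hg).symm))
          · exact Or.inr ⟨k', hk'', hg⟩

-- for one category, B's matched-set test equals A's scan of the category's word list
theorem pv_cat (ks : List String) (c : String) (w1 w2 w3 w4 : String)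
    (hch : ∀ k, pvWordToCategory.get? k = some c ↔ (k = w1 ∨ k = w2 ∨ k = w3 ∨ k = w4)) :
    PySem.Set.contains
      (ks.foldl
        (fun m k =>
          match pvWordToCategory.get? k with
          | some cat => PySem.Set.add m cat
          | none => m) PySem.Set.empty) c
      = [w1, w2, w3, w4].any (fun w => ks.contains w) := by
  have hiff : (∃ k ∈ ks, pvWordToCategory.get? k = some c) ↔ (w1 ∈ ks ∨ w2 ∈ ks ∨ w3 ∈ ks ∨ w4 ∈ ks) := by
    constructor
    · rintro ⟨k, hk, hg⟩
      rcases (hch k).mp hg with rfl | rfl | rfl | rfl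
      · exact Or.inl hk
      · exact Or.inr (Or.inl hk)
      · exact Or.inr (Or.inr (Or.inl hk))
      · exact Or.inr (Or.inr (Or.inr hk))
    · rintro (h | h | h | h)
      · exact ⟨w1, h, (hch w1).mpr (Or.inl rfl)⟩
      · exact ⟨w2, h, (hch w2).mpr (Or.inr (Or.inl rfl))⟩
      · exact ⟨w3, h, (hch w3).mpr (Or.inr (Or.inr (Or.inl rfl)))⟩
      · exact ⟨w4, h, (hch w4).mpr (Or.inr (Or.inr (Or.inr rfl)))⟩
  have hmem := pv_mem_matched ks PySem.Set.empty c
  have hl : PySem.Set.contains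
      (ks.foldl
        (fun m k =>
          match pvWordToCategory.get? k with
          | some cat => PySem.Set.add m cat
          | none => m) PySem.Set.empty) c = true
      ↔ [w1, w2, w3, w4].any (fun w => ks.contains w) = true := by
    rw [PySem.Set.contains_iff, hmem]
    simp [hiff]
  cases hA : PySem.Set.contains
      (ks.foldl
        (fun m k =>
          match pvWordToCategory.get? k with
          | some cat => PySem.Set.add m cat
          | none => m) PySem.Set.empty) c <;>
    cases hB : [w1, w2, w3, w4].any (fun w => ks.contains w) <;> simp_all

-- ===== VERDICT (by name: the statement is the Claim_ definition above) =====
theorem identify_constraints_py_spec : Claim_equal_identify_constraints_py := by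
  intro description keywords _
  unfold Spec_identify_constraints_py identify_constraints_py identify_constraints_py_alt
  have h1 := pv_cat keywords "time_constraint" "urgent" "asap" "deadline" "quickly"
    pv_hch1
  have h2 := pv_cat keywords "security_constraint" "secure" "private" "confidential" "encrypted"
    pv_hch2
  have h3 := pv_cat keywords "compliance_constraint" "compliant" "regulation" "policy" "rule"
    pv_hch3
  have h4 := pv_cat keywords "resource_constraint" "limited" "budget" "cost" "resource"
    pv_hch4
  simp only [pvCategoryWords, List.foldl_cons, List.foldl_nil,
    List.filter_cons, List.filter_nil, h1, h2, h3, h4]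
  split_ifs <;> simp_all
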